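-- pv_equiv track=rewrite | github.com/masoders/wotb-highscores | tankbot/forum_index.py | _split_into_pages
-- ===== SOURCE A (Python) =====
-- def _split_into_pages(header_lines: list[str], table_lines: list[str], footer_lines: list[str], max_len: int = 1900) -> list[str]:
--     """
--     Builds multiple Discord-safe message pages.
--     - header_lines: shown on every page (with page marker added automatically)
--     - table_lines: the table text (already formatted monospaced lines)
--     - footer_lines: shown only on the LAST page
--     """
--     if max_len > 2000:
--         max_len = 2000
--
--     pages: list[str] = []
--     footer_text = ("\n".join(footer_lines)).strip()
--     footer_block = f"\n\n{footer_text}" if footer_text else ""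
--
--     # We'll include footer only on last page, so chunk without it first.
--     base_header = "\n".join([l for l in header_lines if l is not None]).strip()
--
--     i = 0
--     while i < len(table_lines):
--         # Page marker goes in header so we can identify/delete extra pages later
--         # (and so users see it)
--         page_header = base_header
--         # We’ll temporarily write marker with unknown total pages, and fix later.
--         page_header = (page_header + "\n\n" if page_header else "") + "TB_SNAPSHOT_PAGE"
--
--         body_lines = []
--         # reserve space for header + possible footer on last page (we handle later)
--         current = page_header + "\n\n```text\n"
--         remaining = max_len - len(current) - len("\n```")
--
--         # Fill as many table lines as fit
--         while i < len(table_lines):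
--             line = table_lines[i]
--             need = len(line) + 1  # + newline
--             if need > remaining:
--                 break
--             body_lines.append(line)
--             remaining -= need
--             i += 1
--
--         page_text = page_header + "\n\n```text\n" + "\n".join(body_lines) + "\n```"
--         pages.append(page_text)
--
--     # Add footer to last page if it fits, otherwise make a final footer-only page.
--     if pages:
--         last = pages[-1]
--         if footer_block and (len(last) + len(footer_block) <= max_len):
--             pages[-1] = last + footer_block
--         elif footer_block:
--             pages.append("TB_SNAPSHOT_PAGE\n\n" + footer_block)
--
--     # Fix page markers with actual numbering
--     total = len(pages)
--     fixed: list[str] = []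
--     for idx, p in enumerate(pages, start=1):
--         fixed.append(p.replace("TB_SNAPSHOT_PAGE", f"_Snapshot page {idx}/{total}_", 1))
--     return fixed
-- ===== SOURCE B (Python) =====
-- def _split_into_pages(header_lines: list[str], table_lines: list[str], footer_lines: list[str], max_len: int = 1900) -> list[str]:
--     max_len = min(max_len, 2000)
--
--     footer_text = "\n".join(footer_lines).strip()
--     footer_block = f"\n\n{footer_text}" if footer_text else ""
--
--     base_header = "\n".join([l for l in header_lines if l is not None]).strip()
--     page_header = (base_header + "\n\n" if base_header else "") + "TB_SNAPSHOT_PAGE"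
--     # constant per-page budget for table lines (header and code fences are fixed)
--     budget = max_len - len(page_header + "\n\n```text\n") - len("\n```")
--
--     # pass 1: greedily partition the table lines into per-page groups
--     groups: list[list[str]] = []
--     cur: list[str] = []
--     used = 0
--     for line in table_lines:
--         need = len(line) + 1  # + newline
--         if cur and used + need > budget:
--             groups.append(cur)
--             cur, used = [], 0
--         cur.append(line)
--         used += need
--     if cur:
--         groups.append(cur)
--
--     # pass 2: render each group as a page
--     pages = [page_header + "\n\n```text\n" + "\n".join(g) + "\n```" for g in groups]
--
--     # footer goes on the last page if it fits, else on a page of its own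
--     if pages and footer_block:
--         if len(pages[-1]) + len(footer_block) <= max_len:
--             pages[-1] += footer_block
--         else:
--             pages.append("TB_SNAPSHOT_PAGE\n\n" + footer_block)
--
--     total = len(pages)
--     return [p.replace("TB_SNAPSHOT_PAGE", f"_Snapshot page {i}/{total}_", 1)
--             for i, p in enumerate(pages, start=1)]
-- ===== Notes on version B (the rewrite author's own statement) =====
-- stated objective: alternative
-- what changed: Replaces A's nested index-advancing while-loops by a single fold that partitions the table lines into per-page groups plus a separate rendering pass over the groups (page header and per-page budget computed once).
import Mathlib
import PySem

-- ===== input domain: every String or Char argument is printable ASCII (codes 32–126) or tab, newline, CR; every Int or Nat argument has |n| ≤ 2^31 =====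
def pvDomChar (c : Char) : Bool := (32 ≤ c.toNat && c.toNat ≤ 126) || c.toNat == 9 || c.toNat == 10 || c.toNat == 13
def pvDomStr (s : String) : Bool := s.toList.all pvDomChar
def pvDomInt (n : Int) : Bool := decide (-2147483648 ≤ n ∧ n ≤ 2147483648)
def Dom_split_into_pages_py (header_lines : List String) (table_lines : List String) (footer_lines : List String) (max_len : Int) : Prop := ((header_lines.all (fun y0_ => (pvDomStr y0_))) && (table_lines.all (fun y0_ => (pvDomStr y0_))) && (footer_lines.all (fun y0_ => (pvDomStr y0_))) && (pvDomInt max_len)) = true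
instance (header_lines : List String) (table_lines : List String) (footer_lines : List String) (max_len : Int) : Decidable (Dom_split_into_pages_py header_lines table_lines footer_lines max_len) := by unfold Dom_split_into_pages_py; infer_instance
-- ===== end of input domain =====

-- B replaces A's nested index-advancing while-loops by one fold that partitions the table
-- lines into per-page groups and a second pass that renders each group (objective: alternative).

-- shared primitive: Python's s.replace(old, new, 1) — first occurrence only; exact,
-- including old = "" (new is inserted at the front, as CPython does with count 1).
def pvReplaceOnceCs : List Char → List Char → List Char → List Char
  | [], old, new => if old = [] then new else []
  | c :: cs, old, new =>
    if old = [] then new ++ c :: cs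
    else if old.isPrefixOf (c :: cs) then new ++ (c :: cs).drop old.length
    else c :: pvReplaceOnceCs cs old new

def pvReplaceOnce (s old new : String) : String :=
  String.mk (pvReplaceOnceCs s.toList old.toList new.toList)

-- ===== PORT A =====

-- inner 'while i < len(table_lines)' fill loop: consumes the lines that fit 'remaining'
def pvInnerA : Int → List String → List String × List String
  | _, [] => ([], [])
  | r, l :: ls =>
    if PySem.Str.len l + 1 > r then ([], l :: ls)
    else
      let p := pvInnerA (r - (PySem.Str.len l + 1)) ls
      (l :: p.1, p.2)

-- outer 'while i < len(table_lines)' loop, with fuel = number of lines left (Python's loop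
-- diverges when a line never fits an empty page; Pre_ excludes exactly those inputs, and on
-- all other inputs every iteration consumes at least one line, so the fuel never runs out)
def pvOuterA (ml : Int) (bh : String) : Nat → List String → List String → List String
  | 0, _, pages => pages
  | _ + 1, [], pages => pages
  | fuel + 1, l :: ls, pages =>
    let page_header := (if bh ≠ "" then bh ++ "\n\n" else "") ++ "TB_SNAPSHOT_PAGE"
    let current := page_header ++ "\n\n```text\n"
    let remaining := ml - PySem.Str.len current - PySem.Str.len "\n```"
    let p := pvInnerA remaining (l :: ls)
    pvOuterA ml bh fuel p.2
      (pages ++ [page_header ++ "\n\n```text\n" ++ PySem.Str.join "\n" p.1 ++ "\n```"])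

def split_into_pages_py (header_lines : List String) (table_lines : List String) (footer_lines : List String) (max_len : Int) : List String :=
  let max_len := if max_len > 2000 then 2000 else max_len
  let footer_text := PySem.Str.strip (PySem.Str.join "\n" footer_lines)
  let footer_block := if footer_text ≠ "" then "\n\n" ++ footer_text else ""
  -- '[l for l in header_lines if l is not None]': every Lean String is non-None
  let base_header := PySem.Str.strip (PySem.Str.join "\n" header_lines)
  let pages := pvOuterA max_len base_header table_lines.length table_lines []
  let pages2 :=
    match pages.getLast? with
    | none => pages
    | some last =>
      if footer_block ≠ "" ∧ PySem.Str.len last + PySem.Str.len footer_block ≤ max_len then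
        pages.dropLast ++ [last ++ footer_block]
      else if footer_block ≠ "" then
        pages ++ ["TB_SNAPSHOT_PAGE\n\n" ++ footer_block]
      else pages
  let total : Int := pages2.length
  (PySem.List.enumerate pages2 1).map (fun p =>
    pvReplaceOnce p.2 "TB_SNAPSHOT_PAGE"
      ("_Snapshot page " ++ PySem.Int.toStr p.1 ++ "/" ++ PySem.Int.toStr total ++ "_"))

-- ===== PORT B =====

-- one fold step of B's grouping pass: flush the current group when the line does not fit
def pvStepB (budget : Int) (st : List (List String) × List String × Int) (l : String) :
    List (List String) × List String × Int :=
  let need := PySem.Str.len l + 1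
  if st.2.1 ≠ [] ∧ st.2.2 + need > budget then (st.1 ++ [st.2.1], [l], need)
  else (st.1, st.2.1 ++ [l], st.2.2 + need)

def split_into_pages_py_alt (header_lines : List String) (table_lines : List String) (footer_lines : List String) (max_len : Int) : List String :=
  let max_len := min max_len 2000
  let footer_text := PySem.Str.strip (PySem.Str.join "\n" footer_lines)
  let footer_block := if footer_text ≠ "" then "\n\n" ++ footer_text else ""
  let base_header := PySem.Str.strip (PySem.Str.join "\n" header_lines)
  let page_header := (if base_header ≠ "" then base_header ++ "\n\n" else "") ++ "TB_SNAPSHOT_PAGE"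
  let budget := max_len - PySem.Str.len (page_header ++ "\n\n```text\n") - PySem.Str.len "\n```"
  let st := table_lines.foldl (pvStepB budget) ([], [], 0)
  let groups := if st.2.1 ≠ [] then st.1 ++ [st.2.1] else st.1
  let pages := groups.map (fun g => page_header ++ "\n\n```text\n" ++ PySem.Str.join "\n" g ++ "\n```")
  let pages2 :=
    match pages.getLast? with
    | none => pages
    | some last =>
      if footer_block = "" then pages
      else if PySem.Str.len last + PySem.Str.len footer_block ≤ max_len then
        pages.dropLast ++ [last ++ footer_block]
      else pages ++ ["TB_SNAPSHOT_PAGE\n\n" ++ footer_block]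
  let total : Int := pages2.length
  (PySem.List.enumerate pages2 1).map (fun p =>
    pvReplaceOnce p.2 "TB_SNAPSHOT_PAGE"
      ("_Snapshot page " ++ PySem.Int.toStr p.1 ++ "/" ++ PySem.Int.toStr total ++ "_"))

-- ===== PRECONDITION & SPEC =====

def pvHeader (bh : String) : String := (if bh ≠ "" then bh ++ "\n\n" else "") ++ "TB_SNAPSHOT_PAGE"

def pvBudgetOf (ml : Int) (bh : String) : Int :=
  ml - PySem.Str.len (pvHeader bh ++ "\n\n```text\n") - PySem.Str.len "\n```"

-- the per-page byte budget a table line must fit into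
def pvBudget (header_lines : List String) (max_len : Int) : Int :=
  pvBudgetOf (if max_len > 2000 then 2000 else max_len)
    (PySem.Str.strip (PySem.Str.join "\n" header_lines))

-- Pre_ excludes exactly the inputs on which A never returns: a table line longer than the
-- per-page budget makes A's outer while-loop append empty pages forever (i never advances).
def Pre_split_into_pages_py (header_lines : List String) (table_lines : List String) (footer_lines : List String) (max_len : Int) : Prop :=
  ∀ l ∈ table_lines, PySem.Str.len l + 1 ≤ pvBudget header_lines max_len

instance (header_lines : List String) (table_lines : List String) (footer_lines : List String) (max_len : Int) : Decidable (Pre_split_into_pages_py header_lines table_lines footer_lines max_len) := by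
  unfold Pre_split_into_pages_py; infer_instance

def pvWitness_split_into_pages_py : List String × List String × List String × Int :=
  (["Scores"], ["row 1", "row 2"], ["updated"], 100)

def Spec_split_into_pages_py (header_lines : List String) (table_lines : List String) (footer_lines : List String) (max_len : Int) (out : List String) : Prop := out = split_into_pages_py_alt header_lines table_lines footer_lines max_len
instance (header_lines : List String) (table_lines : List String) (footer_lines : List String) (max_len : Int) (out : List String) : Decidable (Spec_split_into_pages_py header_lines table_lines footer_lines max_len out) := by unfold Spec_split_into_pages_py; infer_instance

-- ===== CLAIM (what is proved, stated in full; the proofs are below) =====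
def Claim_equal_split_into_pages_py : Prop := ∀ (header_lines : List String) (table_lines : List String) (footer_lines : List String) (max_len : Int), Dom_split_into_pages_py header_lines table_lines footer_lines max_len → Pre_split_into_pages_py header_lines table_lines footer_lines max_len → Spec_split_into_pages_py header_lines table_lines footer_lines max_len (split_into_pages_py header_lines table_lines footer_lines max_len)

-- ===== LEMMAS AND PROOFS =====

def pvRender (bh : String) (g : List String) : String :=
  pvHeader bh ++ "\n\n```text\n" ++ PySem.Str.join "\n" g ++ "\n```"

-- the greedy page groups, at the group level, with fuel
def pvChunks (r : Int) : Nat → List String → List (List String)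
  | 0, _ => []
  | _ + 1, [] => []
  | fuel + 1, l :: ls => (pvInnerA r (l :: ls)).1 :: pvChunks r fuel (pvInnerA r (l :: ls)).2

def pvFinish (st : List (List String) × List String × Int) : List (List String) :=
  if st.2.1 ≠ [] then st.1 ++ [st.2.1] else st.1

lemma pvInnerA_cons_pos (r : Int) (l : String) (ls : List String)
    (h : PySem.Str.len l + 1 > r) : pvInnerA r (l :: ls) = ([], l :: ls) := by
  simp only [pvInnerA]; rw [if_pos h]

lemma pvInnerA_cons_neg (r : Int) (l : String) (ls : List String)
    (h : ¬ PySem.Str.len l + 1 > r) :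
    pvInnerA r (l :: ls)
      = (l :: (pvInnerA (r - (PySem.Str.len l + 1)) ls).1,
         (pvInnerA (r - (PySem.Str.len l + 1)) ls).2) := by
  simp only [pvInnerA]; rw [if_neg h]

lemma pvInnerA_append (r : Int) (ls : List String) :
    (pvInnerA r ls).1 ++ (pvInnerA r ls).2 = ls := by
  induction ls generalizing r with
  | nil => simp [pvInnerA]
  | cons l ls ih =>
    by_cases h : PySem.Str.len l + 1 > r
    · rw [pvInnerA_cons_pos r l ls h]; rfl
    · rw [pvInnerA_cons_neg r l ls h]; simp [ih]

lemma pvOuterA_eq (ml : Int) (bh : String) :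
    ∀ (fuel : Nat) (lines pages : List String),
      pvOuterA ml bh fuel lines pages
        = pages ++ (pvChunks (pvBudgetOf ml bh) fuel lines).map (pvRender bh) := by
  intro fuel
  induction fuel with
  | zero => intro lines pages; simp [pvOuterA, pvChunks]
  | succ n ih =>
    intro lines pages
    cases lines with
    | nil => simp [pvOuterA, pvChunks]
    | cons l ls =>
      simp only [pvOuterA, pvChunks, ih, pvRender, pvHeader, pvBudgetOf, List.map_cons,
        List.append_assoc, List.singleton_append]

lemma pvChunks_stable (r : Int) :
    ∀ (n : Nat) (ls : List String), (∀ l ∈ ls, PySem.Str.len l + 1 ≤ r) →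
      ls.length ≤ n → ∀ m, ls.length ≤ m → pvChunks r n ls = pvChunks r m ls := by
  intro n
  induction n with
  | zero =>
    intro ls _ hn m _
    have : ls = [] := List.eq_nil_of_length_eq_zero (Nat.le_zero.mp hn)
    subst this; cases m <;> simp [pvChunks]
  | succ n ih =>
    intro ls hpre hn m hm
    cases ls with
    | nil => cases m <;> simp [pvChunks]
    | cons l ls =>
      cases m with
      | zero => simp at hm
      | succ m =>
        have hl : ¬ (PySem.Str.len l + 1 > r) := by
          have := hpre l (by simp); omega
        simp only [pvChunks]
        congr 1
        set q := pvInnerA (r - (PySem.Str.len l + 1)) ls with hq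
        have hrest : (pvInnerA r (l :: ls)).2 = q.2 := by
          rw [pvInnerA_cons_neg r l ls hl, hq]
        have hsub : q.1 ++ q.2 = ls := pvInnerA_append _ _
        have hlen : q.2.length ≤ ls.length := by
          have := congrArg List.length hsub
          simp at this; omega
        have hpre' : ∀ x ∈ (pvInnerA r (l :: ls)).2, PySem.Str.len x + 1 ≤ r := by
          intro x hx
          rw [hrest] at hx
          exact hpre x (by rw [← hsub] at *; simp [List.mem_append, hx])
        rw [hrest] at hpre' ⊢
        exact ih q.2 hpre' (by simp at hn; omega) m (by simp at hm; omega)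

lemma pvFold_eq (r : Int) :
    ∀ (ls : List String) (g : List (List String)) (cur : List String) (used : Int),
      (∀ l ∈ ls, PySem.Str.len l + 1 ≤ r) → cur ≠ [] →
      pvFinish (ls.foldl (pvStepB r) (g, cur, used))
        = g ++ [cur ++ (pvInnerA (r - used) ls).1]
            ++ pvChunks r (pvInnerA (r - used) ls).2.length (pvInnerA (r - used) ls).2 := by
  intro ls
  induction ls with
  | nil => intro g cur used _ hcur; simp [pvInnerA, pvFinish, pvChunks, hcur]
  | cons l ls ih =>
    intro g cur used hpre hcur
    have hl : PySem.Str.len l + 1 ≤ r := hpre l (by simp)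
    have hpre' : ∀ x ∈ ls, PySem.Str.len x + 1 ≤ r := fun x hx => hpre x (by simp [hx])
    by_cases h : used + (PySem.Str.len l + 1) > r
    · -- line does not fit: flush the current group
      have hstep : pvStepB r (g, cur, used) l = (g ++ [cur], [l], PySem.Str.len l + 1) := by
        simp only [pvStepB]; rw [if_pos ⟨hcur, h⟩]
      have hbreak : pvInnerA (r - used) (l :: ls) = ([], l :: ls) :=
        pvInnerA_cons_pos _ _ _ (by omega)
      rw [List.foldl_cons, hstep, ih (g ++ [cur]) [l] (PySem.Str.len l + 1) hpre' (by simp),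
        hbreak]
      -- the RHS chunk head is pvInnerA r (l::ls) = (l :: q.1, q.2)
      set q := pvInnerA (r - (PySem.Str.len l + 1)) ls with hq
      have htake : pvInnerA r (l :: ls) = (l :: q.1, q.2) := by
        rw [pvInnerA_cons_neg r l ls (by omega), hq]
      have hsub : q.1 ++ q.2 = ls := pvInnerA_append _ _
      have hlen : q.2.length ≤ ls.length := by
        have := congrArg List.length hsub; simp at this; omega
      have hpre'' : ∀ x ∈ q.2, PySem.Str.len x + 1 ≤ r := by
        intro x hx; exact hpre' x (by rw [← hsub]; simp [hx])
      simp only [List.length_cons, pvChunks, htake]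
      rw [pvChunks_stable r q.2.length q.2 hpre'' le_rfl ls.length hlen]
      simp
    · -- line fits: extend the current group
      have hstep : pvStepB r (g, cur, used) l = (g, cur ++ [l], used + (PySem.Str.len l + 1)) := by
        simp only [pvStepB]; rw [if_neg (fun hc => h hc.2)]
      have htake : pvInnerA (r - used) (l :: ls)
          = (l :: (pvInnerA (r - used - (PySem.Str.len l + 1)) ls).1,
             (pvInnerA (r - used - (PySem.Str.len l + 1)) ls).2) := by
        rw [pvInnerA_cons_neg _ l ls (by omega)]
      rw [List.foldl_cons, hstep, ih g (cur ++ [l]) (used + (PySem.Str.len l + 1)) hpre' (by simp),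
        htake]
      have harith : r - (used + (PySem.Str.len l + 1)) = r - used - (PySem.Str.len l + 1) := by ring
      rw [harith]
      simp

lemma pvFold_start (r : Int) (ls : List String)
    (hpre : ∀ l ∈ ls, PySem.Str.len l + 1 ≤ r) :
    pvFinish (ls.foldl (pvStepB r) ([], [], 0)) = pvChunks r ls.length ls := by
  cases ls with
  | nil => simp [pvFinish, pvChunks]
  | cons l ls =>
    have hl : PySem.Str.len l + 1 ≤ r := hpre l (by simp)
    have hpre' : ∀ x ∈ ls, PySem.Str.len x + 1 ≤ r := fun x hx => hpre x (by simp [hx])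
    have hstep : pvStepB r ([], [], 0) l = ([], [l], 0 + (PySem.Str.len l + 1)) := by
      simp only [pvStepB]; rw [if_neg (fun hc => hc.1 rfl)]; rfl
    rw [List.foldl_cons, hstep,
      pvFold_eq r ls [] [l] (0 + (PySem.Str.len l + 1)) hpre' (by simp)]
    set q := pvInnerA (r - (0 + (PySem.Str.len l + 1))) ls with hq
    have hq' : q = pvInnerA (r - (PySem.Str.len l + 1)) ls := by rw [hq]; ring_nf
    have htake : pvInnerA r (l :: ls) = (l :: q.1, q.2) := by
      rw [hq', ← pvInnerA_cons_neg r l ls (by omega)]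
    have hsub : q.1 ++ q.2 = ls := by rw [hq']; exact pvInnerA_append _ _
    have hlen : q.2.length ≤ ls.length := by
      have := congrArg List.length hsub; simp at this; omega
    have hpre'' : ∀ x ∈ q.2, PySem.Str.len x + 1 ≤ r := by
      intro x hx; exact hpre' x (by rw [← hsub]; simp [hx])
    simp only [List.length_cons, pvChunks, htake]
    rw [pvChunks_stable r q.2.length q.2 hpre'' le_rfl ls.length hlen]
    simp

lemma pvTail_eq (fb : String) (ml' : Int) (pages : List String) :
    (match pages.getLast? with
     | none => pages
     | some last =>
       if fb ≠ "" ∧ PySem.Str.len last + PySem.Str.len fb ≤ ml' then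
         pages.dropLast ++ [last ++ fb]
       else if fb ≠ "" then pages ++ ["TB_SNAPSHOT_PAGE\n\n" ++ fb]
       else pages)
    = (match pages.getLast? with
       | none => pages
       | some last =>
         if fb = "" then pages
         else if PySem.Str.len last + PySem.Str.len fb ≤ ml' then
           pages.dropLast ++ [last ++ fb]
         else pages ++ ["TB_SNAPSHOT_PAGE\n\n" ++ fb]) := by
  cases pages.getLast? with
  | none => rfl
  | some last =>
    by_cases h1 : fb = ""
    · simp [h1]
    · by_cases h2 : PySem.Str.len last + PySem.Str.len fb ≤ ml' <;> simp [h1, h2]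

lemma pvCap_eq (ml : Int) : (if ml > 2000 then 2000 else ml) = min ml 2000 := by
  rw [min_def]; split_ifs <;> omega

-- ===== VERDICT (by name: the statement is the Claim_ definition above) =====
theorem split_into_pages_py_spec : Claim_equal_split_into_pages_py := by
  intro hs ts fs ml _ hPre
  unfold Spec_split_into_pages_py
  simp only [split_into_pages_py, split_into_pages_py_alt]
  rw [← pvCap_eq]
  have hPre' : ∀ l ∈ ts, PySem.Str.len l + 1
      ≤ pvBudgetOf (if ml > 2000 then 2000 else ml)
          (PySem.Str.strip (PySem.Str.join "\n" hs)) := hPre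
  have hpages :
      pvOuterA (if ml > 2000 then 2000 else ml) (PySem.Str.strip (PySem.Str.join "\n" hs))
          ts.length ts []
        = (pvFinish (ts.foldl
              (pvStepB (pvBudgetOf (if ml > 2000 then 2000 else ml)
                (PySem.Str.strip (PySem.Str.join "\n" hs)))) ([], [], 0))).map
            (pvRender (PySem.Str.strip (PySem.Str.join "\n" hs))) := by
    rw [pvOuterA_eq, pvFold_start _ _ hPre']
    simp
  unfold pvRender pvBudgetOf pvFinish pvHeader at hpages
  rw [hpages, pvTail_eq]
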